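-- pv_equiv track=rewrite | github.com/Maks1mS/alt-rdb-compare | alt_rdb_comp/utils.py | convert_packages_to_dict_and_filter
-- ===== SOURCE A (Python) =====
-- def convert_packages_to_dict_and_filter(packages, arch_filter = None):
--     is_filter_need = arch_filter is not None
--
--     repo = dict()
--
--     for package in packages:
--         package_arch = package['arch']
--
--         if is_filter_need and package_arch not in arch_filter:
--             continue
--
--         if package_arch not in repo:
--             repo[package_arch] = {}
--
--         repo[package_arch][package['name']] = package
--
--     return repo
-- ===== SOURCE B (Python) =====
-- def convert_packages_to_dict_and_filter(packages, arch_filter = None):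
--     # Phase 1: keep only packages passing the arch filter.
--     if arch_filter is None:
--         kept = packages
--     else:
--         kept = [p for p in packages if p['arch'] in arch_filter]
--     # Phase 2: group kept packages into per-arch lists, in first-seen arch order.
--     groups = {}
--     for p in kept:
--         groups.setdefault(p['arch'], []).append(p)
--     # Phase 3: build each arch's name->package dict in one comprehension (last duplicate name wins).
--     return {arch: {p['name']: p for p in plist} for arch, plist in groups.items()}
-- ===== Notes on version B (the rewrite author's own statement) =====
-- stated objective: alternative
-- what changed: Replaces A's single loop that mutates a nested dict-of-dicts in place with a three-phase pipeline: filter the list, group packages into per-arch lists with setdefault, then build each inner name->package dict by a dict comprehension.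
import Mathlib
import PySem

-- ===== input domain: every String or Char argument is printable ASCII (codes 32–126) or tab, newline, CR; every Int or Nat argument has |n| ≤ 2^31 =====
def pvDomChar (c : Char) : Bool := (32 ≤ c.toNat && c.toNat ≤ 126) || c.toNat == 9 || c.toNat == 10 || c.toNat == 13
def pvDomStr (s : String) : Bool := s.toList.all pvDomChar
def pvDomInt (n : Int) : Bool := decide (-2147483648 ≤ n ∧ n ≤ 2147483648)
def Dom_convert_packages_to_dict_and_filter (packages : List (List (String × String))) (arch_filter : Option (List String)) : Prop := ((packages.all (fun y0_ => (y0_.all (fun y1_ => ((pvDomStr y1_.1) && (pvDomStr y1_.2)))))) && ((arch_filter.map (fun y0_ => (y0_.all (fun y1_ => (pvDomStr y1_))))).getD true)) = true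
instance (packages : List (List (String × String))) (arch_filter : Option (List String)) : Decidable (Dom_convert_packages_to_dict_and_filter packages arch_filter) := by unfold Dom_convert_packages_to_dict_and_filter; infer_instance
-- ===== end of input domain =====

-- B replaces A's single loop mutating a nested dict-of-dicts with a filter / group-into-lists /
-- dict-comprehension pipeline (objective: alternative decomposition, same cost).

-- shared trivial helper: package[k] for a package given as a dict (total form, used under Pre_)
def pkget (p : List (String × String)) (k : String) : String :=
  (PySem.Dict.mk p).getD k ""

-- ===== PORT A =====
def convert_packages_to_dict_and_filter (packages : List (List (String × String))) (arch_filter : Option (List String)) : List (String × List (String × List (String × String))) :=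
  let is_filter_need := arch_filter.isSome
  let repo : PySem.Dict String (PySem.Dict String (List (String × String))) :=
    packages.foldl (fun repo package =>
      let package_arch := pkget package "arch"
      if is_filter_need && !((arch_filter.getD []).contains package_arch) then repo
      else
        let repo' := if repo.contains package_arch then repo else repo.insert package_arch PySem.Dict.empty
        repo'.insert package_arch ((repo'.getD package_arch PySem.Dict.empty).insert (pkget package "name") package))
      PySem.Dict.empty
  repo.items.map (fun q => (q.1, q.2.items))

-- ===== PORT B =====
def convert_packages_to_dict_and_filter_alt (packages : List (List (String × String))) (arch_filter : Option (List String)) : List (String × List (String × List (String × String))) :=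
  let kept := match arch_filter with
    | none => packages
    | some flt => packages.filter (fun p => flt.contains (pkget p "arch"))
  let groups : PySem.Dict String (List (List (String × String))) :=
    kept.foldl (fun g p => g.modify (pkget p "arch") [] (· ++ [p])) PySem.Dict.empty
  groups.items.map (fun q =>
    (q.1, (q.2.foldl (fun d p => d.insert (pkget p "name") p) PySem.Dict.empty).items))

-- ===== PRECONDITION & SPEC =====
-- Pre_ excludes exactly the inputs where Python A raises KeyError: a package without an 'arch'
-- key, or a package that passes the arch filter but has no 'name' key. (B raises there too.)
def Pre_convert_packages_to_dict_and_filter (packages : List (List (String × String))) (arch_filter : Option (List String)) : Prop :=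
  ∀ p ∈ packages, (PySem.Dict.mk p).contains "arch" = true ∧
    ((arch_filter = none ∨ pkget p "arch" ∈ arch_filter.getD []) →
      (PySem.Dict.mk p).contains "name" = true)
instance (packages : List (List (String × String))) (arch_filter : Option (List String)) : Decidable (Pre_convert_packages_to_dict_and_filter packages arch_filter) := by unfold Pre_convert_packages_to_dict_and_filter; infer_instance

def pvWitness_convert_packages_to_dict_and_filter : (List (List (String × String))) × Option (List String) :=
  ([[("arch", "x86_64"), ("name", "a")], [("arch", "noarch"), ("name", "b")]], none)

def Spec_convert_packages_to_dict_and_filter (packages : List (List (String × String))) (arch_filter : Option (List String)) (out : List (String × List (String × List (String × String)))) : Prop := out = convert_packages_to_dict_and_filter_alt packages arch_filter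
instance (packages : List (List (String × String))) (arch_filter : Option (List String)) (out : List (String × List (String × List (String × String)))) : Decidable (Spec_convert_packages_to_dict_and_filter packages arch_filter out) := by unfold Spec_convert_packages_to_dict_and_filter; infer_instance

-- ===== CLAIM (what is proved, stated in full; the proofs are below) =====
def Claim_equal_convert_packages_to_dict_and_filter : Prop := ∀ (packages : List (List (String × String))) (arch_filter : Option (List String)), Dom_convert_packages_to_dict_and_filter packages arch_filter → Pre_convert_packages_to_dict_and_filter packages arch_filter → Spec_convert_packages_to_dict_and_filter packages arch_filter (convert_packages_to_dict_and_filter packages arch_filter)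

-- ===== LEMMAS AND PROOFS =====

-- the inner dict B builds for one arch's package list
def pvInner (l : List (List (String × String))) : PySem.Dict String (List (String × String)) :=
  l.foldl (fun d p => d.insert (pkget p "name") p) PySem.Dict.empty

-- turn B's dict-of-lists into A's dict-of-dicts
def pvT (g : PySem.Dict String (List (List (String × String)))) : PySem.Dict String (PySem.Dict String (List (String × String))) :=
  PySem.Dict.mk (g.items.map (fun q => (q.1, pvInner q.2)))

-- A's loop body, once a package has passed the filter
def pvStepA (repo : PySem.Dict String (PySem.Dict String (List (String × String)))) (p : List (String × String)) : PySem.Dict String (PySem.Dict String (List (String × String))) :=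
  let repo' := if repo.contains (pkget p "arch") then repo else repo.insert (pkget p "arch") PySem.Dict.empty
  repo'.insert (pkget p "arch") ((repo'.getD (pkget p "arch") PySem.Dict.empty).insert (pkget p "name") p)

lemma pvInner_append_singleton (l : List (List (String × String))) (p : List (String × String)) :
    pvInner (l ++ [p]) = (pvInner l).insert (pkget p "name") p := by
  simp [pvInner]

lemma get?_pvT (g : PySem.Dict String (List (List (String × String)))) (k : String) :
    (pvT g).get? k = (g.get? k).map pvInner := by
  obtain ⟨l⟩ := g
  induction l with
  | nil => rfl
  | cons q rest ih =>
    obtain ⟨qk, qv⟩ := q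
    by_cases h : qk == k
    · simp [pvT, PySem.Dict.get?_mk_cons, h]
    · simpa [pvT, PySem.Dict.get?_mk_cons, h] using ih

lemma contains_pvT (g : PySem.Dict String (List (List (String × String)))) (k : String) :
    (pvT g).contains k = g.contains k := by
  rw [PySem.Dict.contains_eq_isSome_get?, PySem.Dict.contains_eq_isSome_get?, get?_pvT]
  cases g.get? k <;> rfl

lemma getD_pvT_of_contains (g : PySem.Dict String (List (List (String × String)))) (k : String)
    (h : g.contains k = true) :
    (pvT g).getD k PySem.Dict.empty = pvInner (g.getD k []) := by
  rw [PySem.Dict.contains_eq_isSome_get?] at h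
  obtain ⟨l, hl⟩ := Option.isSome_iff_exists.mp h
  rw [PySem.Dict.getD_eq_get?_getD, PySem.Dict.getD_eq_get?_getD, get?_pvT, hl]
  rfl

lemma pvT_insert (g : PySem.Dict String (List (List (String × String)))) (k : String)
    (v : List (List (String × String))) :
    pvT (g.insert k v) = (pvT g).insert k (pvInner v) := by
  apply PySem.Dict.ext
  by_cases h : g.contains k = true
  · rw [pvT, PySem.Dict.items_insert_of_contains _ _ h,
      PySem.Dict.items_insert_of_contains _ _ (by rw [contains_pvT]; exact h)]
    show (g.items.map _).map _ = (g.items.map _).map _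
    rw [List.map_map, List.map_map]
    apply List.map_congr_left
    intro q _
    by_cases hq : q.1 == k <;> simp [Function.comp, hq]
  · rw [pvT, PySem.Dict.items_insert_of_not_contains _ _ (by simpa using h),
      PySem.Dict.items_insert_of_not_contains _ _
        (by rw [contains_pvT]; simpa using h)]
    simp [pvT]

lemma pvStepA_pvT (g : PySem.Dict String (List (List (String × String)))) (p : List (String × String)) :
    pvStepA (pvT g) p = pvT (g.modify (pkget p "arch") [] (· ++ [p])) := by
  have hmod : g.modify (pkget p "arch") [] (· ++ [p])
      = g.insert (pkget p "arch") (g.getD (pkget p "arch") [] ++ [p]) := rfl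
  rw [hmod, pvT_insert, pvInner_append_singleton]
  by_cases h : g.contains (pkget p "arch") = true
  · rw [pvStepA]
    simp only [contains_pvT, h, if_true]
    rw [getD_pvT_of_contains _ _ h]
  · rw [pvStepA]
    simp only [contains_pvT, h, Bool.false_eq_true, if_false]
    rw [PySem.Dict.getD_insert_self, PySem.Dict.insert_insert_self,
      PySem.Dict.getD_of_not_contains _ _ (by simpa using h)]
    rfl

lemma pvFold_pvT (l : List (List (String × String))) (g : PySem.Dict String (List (List (String × String)))) :
    l.foldl pvStepA (pvT g) = pvT (l.foldl (fun g p => g.modify (pkget p "arch") [] (· ++ [p])) g) := by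
  induction l generalizing g with
  | nil => rfl
  | cons p rest ih =>
    simp only [List.foldl_cons, pvStepA_pvT]
    exact ih _

lemma pvT_empty : pvT PySem.Dict.empty = PySem.Dict.empty := rfl

-- ===== VERDICT (by name: the statement is the Claim_ definition above) =====
theorem convert_packages_to_dict_and_filter_spec : Claim_equal_convert_packages_to_dict_and_filter := by
  intro packages arch_filter _ _
  unfold Spec_convert_packages_to_dict_and_filter
  unfold convert_packages_to_dict_and_filter convert_packages_to_dict_and_filter_alt
  have key : ∀ (kept : List (List (String × String))),
      (kept.foldl pvStepA PySem.Dict.empty).items.map (fun q => (q.1, q.2.items))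
      = (kept.foldl (fun g p => g.modify (pkget p "arch") [] (· ++ [p])) PySem.Dict.empty).items.map
          (fun q => (q.1, (q.2.foldl (fun d p => d.insert (pkget p "name") p) PySem.Dict.empty).items)) := by
    intro kept
    rw [← pvT_empty, pvFold_pvT, pvT]
    show (PySem.Dict.mk _).items.map _ = _
    rw [PySem.Dict.items, List.map_map]
    rfl
  cases arch_filter with
  | none =>
    simp only [Option.isSome_none, Bool.false_and, Bool.false_eq_true, if_false]
    exact key packages
  | some flt =>
    simp only [Option.isSome_some, Bool.true_and, Option.getD_some]
    rw [← key (packages.filter (fun p => flt.contains (pkget p "arch"))),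
      List.foldl_filter]
    have hf : (fun (repo : PySem.Dict String (PySem.Dict String (List (String × String)))) package =>
        if (!flt.contains (pkget package "arch")) = true then repo
        else
          (if repo.contains (pkget package "arch") = true then repo
              else repo.insert (pkget package "arch") PySem.Dict.empty).insert
            (pkget package "arch")
            (((if repo.contains (pkget package "arch") = true then repo
                    else repo.insert (pkget package "arch") PySem.Dict.empty).getD
                  (pkget package "arch") PySem.Dict.empty).insert
              (pkget package "name") package))
        = fun repo package => if flt.contains (pkget package "arch") = true then pvStepA repo package else repo := by
      funext repo package
      by_cases h : pkget package "arch" ∈ flt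
      · simp [h, pvStepA]
      · simp [h]
    rw [hf]
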